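-- pv_equiv track=rewrite | github.com/AvivYaniv/Project-Euler | Solutions/92.py | get_square_digit_chains_89_results
-- ===== SOURCE A (Python) =====
-- import string
-- import collections
-- from functools import reduce
-- from itertools import combinations_with_replacement
-- from math import factorial
-- from operator import mul
--
-- def get_square_digit_chains_89_results(threshold=10000000):
--     # Variable Definition
--     threshold_digits_length             = len(str(threshold))
--     threshold_trailing_digits_length    = threshold_digits_length - 1
--     # Cache Functions
--     digits_squares_cache                = { d: d**2 for d in range(10) }
--     def get_cahced_square(d):
--         return digits_squares_cache[int(d)]
--     factorials_cache                    = { x : factorial(x) for x in range(threshold_digits_length) }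
--     def get_cahced_factorial(n):
--         return factorials_cache[n]
--     # Chain Functions
--     def get_square_digit_chain(number):
--         number       = int(number)
--         chain        = [ number ]
--         if not 0 == number:
--             while number not in (1, 89):
--                 number = sum(map(get_cahced_square, str(number)))
--                 chain.append(number)
--         return chain
--     # Code Section
--     square_digit_chains_89_counter      = 0
--     for number_digits in combinations_with_replacement(string.digits, threshold_trailing_digits_length):
--             chain = get_square_digit_chain(''.join(number_digits))
--             if 89 == chain[-1]:
--                 digits_histogram = collections.Counter(number_digits)
--                 square_digit_chains_89_counter +=                               \
--                     get_cahced_factorial(threshold_trailing_digits_length) //   \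
--                     reduce(mul, map(get_cahced_factorial, digits_histogram.values()), 1)
--     return square_digit_chains_89_counter
-- ===== SOURCE B (Python) =====
-- def get_square_digit_chains_89_results(threshold=10000000):
--     trailing = len(str(threshold)) - 1
--     # Digit-DP: ways[s] = number of digit strings of the current length (leading
--     # zeros allowed) whose squared-digit sum is s.  One pass per digit position.
--     ways = [1]
--     for _ in range(trailing):
--         prev = ways
--         ways = [sum(prev[s - d * d] for d in range(10) if 0 <= s - d * d < len(prev))
--                 for s in range(len(prev) + 81)]
--     total = 0
--     for s, count in enumerate(ways):
--         if s != 0: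
--             v = s
--             while v not in (1, 89):
--                 v = sum(int(ch) ** 2 for ch in str(v))
--             if v == 89:
--                 total += count
--     return total
-- ===== Notes on version B (the rewrite author's own statement) =====
-- stated objective: faster
-- what changed: B replaces A's enumeration of all digit multisets (testing each chain and adding a multinomial permutation count per multiset) by a digit-DP: it builds, one digit position at a time, the table ways[s] = number of digit strings with squared-digit sum s, and sums the counts of the sums whose chain ends at 89.
-- outside the precondition, e.g. on get_square_digit_chains_89_results(5): A raises ValueError, B returns 0; on get_square_digit_chains_89_results(0): A raises ValueError, B returns 0
import Mathlib
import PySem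

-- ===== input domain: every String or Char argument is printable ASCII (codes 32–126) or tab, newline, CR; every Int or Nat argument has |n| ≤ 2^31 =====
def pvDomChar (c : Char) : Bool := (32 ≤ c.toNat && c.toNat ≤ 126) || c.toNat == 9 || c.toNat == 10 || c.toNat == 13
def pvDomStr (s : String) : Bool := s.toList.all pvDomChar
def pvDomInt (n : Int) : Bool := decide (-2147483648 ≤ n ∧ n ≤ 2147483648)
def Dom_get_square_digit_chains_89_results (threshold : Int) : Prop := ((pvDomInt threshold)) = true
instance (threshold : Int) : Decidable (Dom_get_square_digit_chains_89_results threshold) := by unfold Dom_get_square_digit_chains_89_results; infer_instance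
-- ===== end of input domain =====

-- B replaces A's enumeration of digit multisets (with a multinomial count per multiset)
-- by a digit-DP that counts digit strings per squared-digit sum, one pass per digit
-- position; measurably faster (polynomial in the digit count instead of C(t+9,9) chain walks).

-- itertools.combinations_with_replacement(pool, r) as a list, in CPython's
-- index-lexicographic order (hand port, exact); Python A iterates it.
def pvCWR {α : Type} : Nat → List α → List (List α)
  | 0, _ => [[]]
  | r + 1, xs =>
    xs.tails.flatMap (fun s =>
      match s with
      | [] => []
      | y :: rest => (pvCWR r (y :: rest)).map (y :: ·))

def pvADigits : List Char := ['0', '1', '2', '3', '4', '5', '6', '7', '8', '9']  -- string.digits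

-- ===== PORT A =====

-- digits_squares_cache = { d: d**2 for d in range(10) }
def pvASquares : PySem.Dict Int Int :=
  (PySem.List.pyRange 0 10 1).foldl (fun d x => d.insert x (x ^ 2)) PySem.Dict.empty

-- get_cahced_square(d) (single-char int(d): ValueError is unreachable here, getD 0 is unused)
def pvAGetSquare (c : Char) : Int :=
  pvASquares.getD ((PySem.Int.ofChars? [c]).getD 0) 0

-- factorials_cache = { x: factorial(x) for x in range(threshold_digits_length) }
def pvAFacts (len : Int) : PySem.Dict Int Int :=
  (PySem.List.pyRange 0 len 1).foldl
    (fun d x => d.insert x ((Nat.factorial x.toNat : Nat) : Int)) PySem.Dict.empty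

def pvAGetFact (len n : Int) : Int := (pvAFacts len).getD n 0

-- number = sum(map(get_cahced_square, str(number)))
def pvAStep (w : Int) : Int := ((PySem.Int.toChars w).map pvAGetSquare).sum

-- the 'while number not in (1, 89)' loop; fuel only makes the loop total (1000 steps is
-- far beyond any chain length reachable on the admitted inputs)
def pvChainLoop : Nat → Int → List Int → List Int
  | 0, _, chain => chain
  | fuel + 1, number, chain =>
    if number = 1 ∨ number = 89 then chain
    else pvChainLoop fuel (pvAStep number) (chain ++ [pvAStep number])

-- get_square_digit_chain(number); int('') raises ValueError, reached only when the
-- threshold has a single digit, excluded by Pre_ (the getD 0 default is unused inside Pre_)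
def pvAChain (digits : List Char) : List Int :=
  let number := (PySem.Int.ofChars? digits).getD 0
  if (0 : Int) = number then [number]
  else pvChainLoop 1000 number [number]

-- A's body after 'threshold_digits_length = len(str(threshold))'
def pvAMain (tdl : Int) : Int :=
  (pvCWR (tdl - 1).toNat pvADigits).foldl
    (fun counter number_digits =>
      let chain := pvAChain number_digits
      if PySem.List.pyGetD chain (-1) 0 = 89 then
        counter +
          PySem.Int.floordiv (pvAGetFact tdl (tdl - 1))
            (((PySem.Dict.counter number_digits).values.map (pvAGetFact tdl)).foldl (· * ·) 1)
      else counter) 0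

def get_square_digit_chains_89_results (threshold : Int) : Int :=
  pvAMain (PySem.Str.len (PySem.Int.toStr threshold))

-- ===== PORT B =====

-- s = sum(int(ch) ** 2 for ch in str(v))   (the 'while' body of B's endpoint walk)
def pvBStep (w : Int) : Int :=
  ((PySem.Int.toChars w).map (fun ch => ((PySem.Int.ofChars? [ch]).getD 0) ^ 2)).sum

-- the 'while v not in (1, 89)' walk; fuel only makes the loop total (999 steps is far
-- beyond any chain length reachable on the admitted inputs)
def pvEndLoop : Nat → Int → Int
  | 0, v => v
  | fuel + 1, v => if v = 1 ∨ v = 89 then v else pvEndLoop fuel (pvBStep v)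

-- ways = [sum(prev[s - d*d] for d in range(10) if 0 <= s - d*d < len(prev))
--         for s in range(len(prev) + 81)]
def pvBRow (prev : List Int) : List Int :=
  (PySem.List.pyRange 0 (PySem.List.len prev + 81) 1).map (fun s =>
    (PySem.List.pyRange 0 10 1).foldl (fun acc d =>
      if 0 ≤ s - d * d ∧ s - d * d < PySem.List.len prev then
        acc + PySem.List.pyGetD prev (s - d * d) 0
      else acc) 0)

-- B's body after 'trailing = len(str(threshold)) - 1'
def pvBMain (tdl : Int) : Int :=
  let ways := (PySem.List.pyRange 0 (tdl - 1) 1).foldl (fun ways _ => pvBRow ways) [(1 : Int)]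
  (PySem.List.enumerate ways 0).foldl (fun total sc =>
    if sc.1 ≠ 0 then
      if pvEndLoop 999 sc.1 = 89 then total + sc.2 else total
    else total) 0

def get_square_digit_chains_89_results_alt (threshold : Int) : Int :=
  pvBMain (PySem.Str.len (PySem.Int.toStr threshold))

-- ===== PRECONDITION & SPEC =====
-- Pre_ excludes exactly 0 ≤ threshold ≤ 9, where Python A raises ValueError (int('') on
-- the empty digit tuple); B returns 0 there.
def Pre_get_square_digit_chains_89_results (threshold : Int) : Prop :=
  threshold < 0 ∨ 10 ≤ threshold
instance (threshold : Int) : Decidable (Pre_get_square_digit_chains_89_results threshold) := by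
  unfold Pre_get_square_digit_chains_89_results; infer_instance
def pvWitness_get_square_digit_chains_89_results : Int := 100


def Spec_get_square_digit_chains_89_results (threshold : Int) (out : Int) : Prop :=
  out = get_square_digit_chains_89_results_alt threshold
instance (threshold : Int) (out : Int) :
    Decidable (Spec_get_square_digit_chains_89_results threshold out) := by
  unfold Spec_get_square_digit_chains_89_results; infer_instance

-- ===== CLAIM (what is proved, stated in full; the proofs are below) =====
def Claim_equal_get_square_digit_chains_89_results : Prop :=
  ∀ (threshold : Int), Dom_get_square_digit_chains_89_results threshold →
    Pre_get_square_digit_chains_89_results threshold →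
    Spec_get_square_digit_chains_89_results threshold (get_square_digit_chains_89_results threshold)

-- ===== LEMMAS AND PROOFS =====

-- ---------- proof-side notions ----------

-- digit value of a digit character
def pvDval (c : Char) : Nat := c.toNat - 48

-- sum of squared digit values of a digit string
def pvSsum (l : List Char) : Nat := (l.map (fun c => pvDval c * pvDval c)).sum

-- all digit strings of length n (leading zeros allowed)
def pvAll : Nat → List (List Char)
  | 0 => [[]]
  | n + 1 => pvADigits.flatMap (fun d => (pvAll n).map (d :: ·))

-- number of length-n digit strings with squared-digit sum s
def pvW (n s : Nat) : Nat := (pvAll n).countP (fun l => decide (pvSsum l = s))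

-- the common chain test, as a function of the squared-digit sum
abbrev pvGoodS (s : Nat) : Prop := s ≠ 0 ∧ pvEndLoop 999 (s : Int) = 89

-- number of anagrams of c among all digit strings of its length
def pvNP (c : List Char) : Nat := (pvAll c.length).countP (fun l => decide (l.Perm c))

-- product of the factorials of the digit multiplicities of c
def pvF (c : List Char) : Nat := (pvADigits.map (fun d => (List.count d c).factorial)).prod

-- sum of squared decimal digits of a number
def pvSdsum (n : Nat) : Nat :=
  if n < 10 then n * n else pvSdsum (n / 10) + (n % 10) * (n % 10)
decreasing_by exact Nat.div_lt_self (by omega) (by omega)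

-- int(l) for a digit string, as a fold
def pvValNat (l : List Char) (a : Nat) : Nat := l.foldl (fun x c => x * 10 + pvDval c) a

-- the A-side loop, as the value of its last chain element
def pvAVal : Nat → Int → Int
  | 0, v => v
  | fuel + 1, v => if v = 1 ∨ v = 89 then v else pvAVal fuel (pvAStep v)

-- ---------- characters ----------

lemma pvCharEq {c d : Char} (h : c.toNat = d.toNat) : c = d :=
  Char.ext (UInt32.toNat_inj.mp h)

lemma pvDigit_mem (c : Char) (h : c.isDigit = true) : c ∈ pvADigits := by
  simp [Char.isDigit] at h
  obtain ⟨h1, h2⟩ := h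
  have hl : 48 ≤ c.toNat := h1
  have hr : c.toNat ≤ 57 := h2
  interval_cases h3 : c.toNat <;>
    first
    | (rw [show c = '0' from pvCharEq h3]; decide)
    | (rw [show c = '1' from pvCharEq h3]; decide)
    | (rw [show c = '2' from pvCharEq h3]; decide)
    | (rw [show c = '3' from pvCharEq h3]; decide)
    | (rw [show c = '4' from pvCharEq h3]; decide)
    | (rw [show c = '5' from pvCharEq h3]; decide)
    | (rw [show c = '6' from pvCharEq h3]; decide)
    | (rw [show c = '7' from pvCharEq h3]; decide)
    | (rw [show c = '8' from pvCharEq h3]; decide)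
    | (rw [show c = '9' from pvCharEq h3]; decide)

lemma pvAGetSquare_eq (c : Char) (hc : c.isDigit = true ∨ c = '-') :
    pvAGetSquare c = ((PySem.Int.ofChars? [c]).getD 0) ^ 2 := by
  rcases hc with hc | rfl
  · have := pvDigit_mem c hc
    fin_cases this <;> decide
  · decide

lemma pvToChars_shape (w : Int) : ∀ c ∈ PySem.Int.toChars w, c.isDigit = true ∨ c = '-' := by
  intro c hc
  unfold PySem.Int.toChars at hc
  split at hc
  · rcases List.mem_cons.mp hc with rfl | hc
    · right; rfl
    · left; exact Nat.isDigit_of_mem_toDigits (by omega) (by omega) hc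
  · left; exact Nat.isDigit_of_mem_toDigits (by omega) (by omega) hc

lemma pvStep_eq (w : Int) : pvAStep w = pvBStep w := by
  unfold pvAStep pvBStep
  rw [List.map_congr_left (fun c hc => pvAGetSquare_eq c (pvToChars_shape w c hc))]

-- ---------- the chain loops ----------

lemma pvLoop_eq (fuel : Nat) (v : Int) : pvAVal fuel v = pvEndLoop fuel v := by
  induction fuel generalizing v with
  | zero => rfl
  | succ f ih =>
    rw [pvAVal, pvEndLoop]
    split
    · rfl
    · rw [pvStep_eq]; exact ih _

lemma pvChain_last (fuel : Nat) (v : Int) (l : List Int) :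
    PySem.List.pyGetD (pvChainLoop fuel v (l ++ [v])) (-1) 0 = pvAVal fuel v := by
  induction fuel generalizing v l with
  | zero => rw [pvChainLoop, pvAVal, PySem.List.pyGetD_neg_one_append_singleton]
  | succ f ih =>
    rw [pvChainLoop, pvAVal]
    split
    · rw [PySem.List.pyGetD_neg_one_append_singleton]
    · rw [show l ++ [v] ++ [pvAStep v] = (l ++ [v]) ++ [pvAStep v] from rfl]
      exact ih _ _

lemma pvAVal_zero (fuel : Nat) : pvAVal fuel 0 = 0 := by
  induction fuel with
  | zero => rfl
  | succ f ih =>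
    rw [pvAVal, if_neg (by omega), show pvAStep 0 = 0 from by decide]
    exact ih

lemma pvEndLoop_zero (fuel : Nat) : pvEndLoop fuel 0 = 0 := by
  induction fuel with
  | zero => rfl
  | succ f ih =>
    rw [pvEndLoop, if_neg (by omega), show pvBStep 0 = 0 from by decide]
    exact ih

lemma pvSelector_eq (v : Int) :
    (pvAVal 1000 v = 89) ↔ ((pvBStep v ≠ 0) ∧ pvEndLoop 999 (pvBStep v) = 89) := by
  by_cases h1 : v = 1
  · subst h1
    rw [show pvAVal 1000 1 = 1 from by decide, show pvBStep 1 = 1 from by decide,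
      show pvEndLoop 999 1 = 1 from by decide]
    simp
  by_cases h2 : v = 89
  · subst h2
    rw [show pvAVal 1000 89 = 89 from by decide, show pvBStep 89 = 145 from by decide,
      show pvEndLoop 999 145 = 89 from by decide]
    simp
  · rw [show pvAVal 1000 v = pvAVal 999 (pvAStep v) from by
      rw [pvAVal, if_neg (by tauto)], pvStep_eq v]
    by_cases hs : pvBStep v = 0
    · rw [hs, show pvAVal 999 0 = 0 from pvAVal_zero 999, pvEndLoop_zero 999]
      simp
    · rw [pvLoop_eq 999 (pvBStep v)]
      simp [hs]

lemma pvAChain_last (c : List Char) :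
    PySem.List.pyGetD (pvAChain c) (-1) 0 =
      pvAVal 1000 ((PySem.Int.ofChars? c).getD 0) := by
  simp only [pvAChain]
  split
  · next h0 =>
    rw [← h0, pvAVal_zero 1000]
    rfl
  · exact (show ([(PySem.Int.ofChars? c).getD 0] : List Int) =
      [] ++ [(PySem.Int.ofChars? c).getD 0] from rfl) ▸
      pvChain_last 1000 ((PySem.Int.ofChars? c).getD 0) []

-- ---------- the factorial cache ----------

lemma pvFacts_aux (n m : Nat) (hm : m < n) :
    ((List.map (fun k : Nat => (0 : Int) + (k : Int)) (List.range n)).foldl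
        (fun d x => d.insert x ((Nat.factorial x.toNat : Nat) : Int))
        PySem.Dict.empty).getD (m : Int) 0 = ((Nat.factorial m : Nat) : Int) := by
  induction n with
  | zero => omega
  | succ n ih =>
    rw [List.range_succ, List.map_append, List.foldl_append]
    by_cases h : m = n
    · subst h
      simp only [List.map_cons, List.map_nil, List.foldl_cons, List.foldl_nil]
      rw [show (0 : Int) + (m : Int) = (m : Int) from by omega,
        PySem.Dict.getD_insert_self]
      simp
    · simp only [List.map_cons, List.map_nil, List.foldl_cons, List.foldl_nil]
      rw [PySem.Dict.getD_insert_of_ne _ _ _ (by intro hc; apply h; omega)]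
      exact ih (by omega)

lemma pvGetFact_eq (len m : Int) (h0 : 0 ≤ m) (hm : m < len) :
    pvAGetFact len m = ((Nat.factorial m.toNat : Nat) : Int) := by
  unfold pvAGetFact pvAFacts
  rw [PySem.List.pyRange_one]
  have hlen : 0 ≤ len := by omega
  have := pvFacts_aux len.toNat m.toNat (by omega)
  rw [show ((m.toNat : Nat) : Int) = m from by omega] at this
  rw [show (len - 0).toNat = len.toNat from by omega]
  exact this

-- ---------- A's multinomial denominator ----------

lemma pvProd_filter {α : Type} (l : List α) (p : α → Prop) [DecidablePred p] (g : α → Int)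
    (h1 : ∀ x ∈ l, ¬ p x → g x = 1) :
    (l.map g).prod = (((l.filter (fun x => decide (p x))).map g)).prod := by
  induction l with
  | nil => rfl
  | cons a t ih =>
    by_cases hp : p a
    · simp only [List.map_cons, List.prod_cons, List.filter_cons, decide_eq_true hp]
      rw [ih (fun x hx => h1 x (by simp [hx]))]
      simp
    · simp only [List.map_cons, List.prod_cons, List.filter_cons]
      rw [h1 a (by simp) hp, one_mul, ih (fun x hx => h1 x (by simp [hx]))]
      simp [hp]

lemma pvDenom_eq (len : Int) (combo : List Char) (hmem : ∀ c ∈ combo, c ∈ pvADigits)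
    (hlen : (combo.length : Int) < len) :
    ((PySem.Dict.counter combo).values.map (pvAGetFact len)).foldl (· * ·) 1 =
      ((pvF combo : Nat) : Int) := by
  have hvals : (PySem.Dict.counter combo).values =
      (PySem.Set.ofList combo).map (fun k => ((List.count k combo : Nat) : Int)) := by
    show ((PySem.Dict.counter combo).items).map (·.2) = _
    rw [PySem.Dict.items_counter]
    simp
  rw [hvals, List.map_map]
  have hg : ∀ k ∈ PySem.Set.ofList combo,
      (pvAGetFact len ∘ fun k => ((List.count k combo : Nat) : Int)) k =
        ((Nat.factorial (List.count k combo) : Nat) : Int) := by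
    intro k _
    have hc : List.count k combo ≤ combo.length := List.count_le_length
    rw [Function.comp_apply, pvGetFact_eq len _ (by omega) (by omega)]
    simp
  rw [List.map_congr_left hg, ← List.prod_eq_foldl]
  have hperm : (PySem.Set.ofList combo).Perm
      (pvADigits.filter (fun d => decide (d ∈ combo))) := by
    rw [List.perm_ext_iff_of_nodup (PySem.Set.nodup_ofList _)
      ((by decide : pvADigits.Nodup).filter _)]
    intro a
    simp only [PySem.Set.mem_ofList, List.mem_filter, decide_eq_true_eq]
    exact ⟨fun ha => ⟨hmem a ha, ha⟩, fun ha => ha.2⟩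
  calc ((PySem.Set.ofList combo).map
          (fun k => ((Nat.factorial (List.count k combo) : Nat) : Int))).prod
      = ((pvADigits.filter (fun d => decide (d ∈ combo))).map
          (fun k => ((Nat.factorial (List.count k combo) : Nat) : Int))).prod :=
        (hperm.map _).prod_eq
    _ = (pvADigits.map (fun d => ((Nat.factorial (List.count d combo) : Nat) : Int))).prod := by
        rw [← pvProd_filter pvADigits (fun d => d ∈ combo)
          (fun k => ((Nat.factorial (List.count k combo) : Nat) : Int))]
        intro x _ hx
        rw [List.count_eq_zero.mpr hx]
        rfl
    _ = ((pvF combo : Nat) : Int) := by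
        unfold pvF
        push_cast
        rw [List.map_map]
        rfl

-- ---------- parsing a digit string (int(s) on the shapes reached here) ----------

lemma pvNoSpace (c : Char) (h : c ∈ pvADigits) : PySem.Int.isIntSpace c = false := by
  fin_cases h <;> decide

lemma pvGenParse (G : List Char → Bool → Nat → Option Nat)
    (hnil : ∀ acc : Nat, G [] true acc = some acc)
    (hstep : ∀ c ∈ pvADigits, ∀ (rest : List Char) (b : Bool) (acc : Nat),
      G (c :: rest) b acc = G rest true (acc * 10 + (c.toNat - '0'.toNat)))
    (l : List Char) (acc : Nat) (h : ∀ x ∈ l, x ∈ pvADigits) :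
    Option.map (fun n : Int => n)
      (Bind.bind (G l true acc) (fun a : Nat => Pure.pure ((a : Nat) : Int))) =
      some ((pvValNat l acc : Nat) : Int) := by
  induction l generalizing acc with
  | nil => rw [hnil]; rfl
  | cons c rest ih =>
    rw [hstep c (h c (by simp)) rest true acc,
      ih _ (fun x hx => h x (by simp [hx]))]
    rfl

lemma pvParse (l : List Char) (hne : l ≠ []) (h : ∀ c ∈ l, c ∈ pvADigits) :
    PySem.Int.ofChars? l = some ((pvValNat l 0 : Nat) : Int) := by
  have hds : List.dropWhile PySem.Int.isIntSpace l = l := by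
    cases l with
    | nil => rfl
    | cons c rest => exact List.dropWhile_cons_of_neg (by simp [pvNoSpace c (h c (by simp))])
  have hds2 : List.dropWhile PySem.Int.isIntSpace l.reverse = l.reverse := by
    rcases hrev : l.reverse with _ | ⟨c, rest⟩
    · rfl
    · refine List.dropWhile_cons_of_neg ?_
      have : c ∈ l := by
        have : c ∈ l.reverse := by rw [hrev]; simp
        simpa using this
      simp [pvNoSpace c (h c this)]
  simp only [PySem.Int.ofChars?]
  rw [hds, hds2, List.reverse_reverse]
  cases l with
  | nil => exact absurd rfl hne
  | cons c rest =>
    have hc := h c (by simp)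
    have hrest : ∀ x ∈ rest, x ∈ pvADigits := fun x hx => h x (by simp [hx])
    clear hds hds2 hne h
    fin_cases hc <;>
      · refine (pvGenParse _ ?_ ?_ rest _ hrest).trans ?_
        · intro acc; rfl
        · intro d hd rest' b acc
          fin_cases hd <;> rfl
        · rfl

-- ---------- squared-digit sums ----------

lemma pvSdsum_zero : pvSdsum 0 = 0 := by rw [pvSdsum]; norm_num

lemma pvSdsum_mul (a d : Nat) (hd : d < 10) : pvSdsum (a * 10 + d) = pvSdsum a + d * d := by
  by_cases ha : a = 0
  · subst ha
    rw [show 0 * 10 + d = d from by omega, pvSdsum, if_pos hd, pvSdsum_zero]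
    omega
  · rw [pvSdsum, if_neg (by omega),
      show (a * 10 + d) / 10 = a from by omega,
      show (a * 10 + d) % 10 = d from by omega]

lemma pvDval_lt (c : Char) (h : c ∈ pvADigits) : pvDval c < 10 := by
  fin_cases h <;> decide

lemma pvSdsum_val (l : List Char) (a : Nat) (h : ∀ c ∈ l, c ∈ pvADigits) :
    pvSdsum (pvValNat l a) = pvSdsum a + pvSsum l := by
  induction l generalizing a with
  | nil => simp [pvValNat, pvSsum]
  | cons c rest ih =>
    have hstep : pvValNat (c :: rest) a = pvValNat rest (a * 10 + pvDval c) := rfl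
    rw [hstep, ih _ (fun x hx => h x (by simp [hx])),
      pvSdsum_mul _ _ (pvDval_lt c (h c (by simp)))]
    simp [pvSsum]
    omega

lemma pvDigitChar_sq (d : Nat) (hd : d < 10) :
    pvDval d.digitChar * pvDval d.digitChar = d * d := by
  interval_cases d <;> decide

lemma pvTD_sum (fuel : Nat) : ∀ (n : Nat) (acc : List Char), n < fuel →
    ((Nat.toDigitsCore 10 fuel n acc).map (fun c => pvDval c * pvDval c)).sum =
      pvSdsum n + ((acc.map (fun c => pvDval c * pvDval c)).sum) := by
  induction fuel with
  | zero => omega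
  | succ f ih =>
    intro n acc hn
    rw [Nat.toDigitsCore]
    by_cases h0 : n / 10 = 0
    · rw [if_pos h0]
      simp only [List.map_cons, List.sum_cons]
      rw [show n % 10 = n from by omega, pvDigitChar_sq n (by omega),
        pvSdsum, if_pos (by omega)]
    · rw [if_neg h0]
      rw [ih (n / 10) _ (by omega)]
      simp only [List.map_cons, List.sum_cons]
      rw [pvDigitChar_sq (n % 10) (by omega)]
      conv_rhs => rw [pvSdsum, if_neg (by omega)]
      omega

lemma pvCastSum (l : List Char) (f : Char → Nat) :
    ((l.map (fun c => ((f c : Nat) : Int))).sum) = (((l.map f).sum : Nat) : Int) := by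
  induction l with
  | nil => rfl
  | cons c rest ih => simp [ih]

lemma pvSqChar (c : Char) (h : c.isDigit = true) :
    ((PySem.Int.ofChars? [c]).getD 0) ^ 2 = ((pvDval c * pvDval c : Nat) : Int) := by
  have := pvDigit_mem c h
  fin_cases this <;> decide

lemma pvBStep_sdsum (v : Int) (hv : 0 ≤ v) : pvBStep v = ((pvSdsum v.toNat : Nat) : Int) := by
  unfold pvBStep
  rw [PySem.Int.toChars, if_neg (by omega)]
  have hsh : ∀ c ∈ Nat.toDigits 10 v.toNat, c.isDigit = true :=
    fun c hc => Nat.isDigit_of_mem_toDigits (by omega) (by omega) hc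
  rw [List.map_congr_left (fun c hc => pvSqChar c (hsh c hc)), pvCastSum]
  congr 1
  unfold Nat.toDigits
  rw [pvTD_sum _ _ _ (by omega)]
  simp

-- the A-side per-combination test, as a function of the squared-digit sum
lemma pvGood_eq (c : List Char) (hne : c ≠ []) (h : ∀ x ∈ c, x ∈ pvADigits) :
    (PySem.List.pyGetD (pvAChain c) (-1) 0 = 89) ↔ pvGoodS (pvSsum c) := by
  rw [pvAChain_last, pvParse c hne h]
  rw [show (some ((pvValNat c 0 : Nat) : Int)).getD 0 = ((pvValNat c 0 : Nat) : Int) from rfl]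
  rw [pvSelector_eq, pvBStep_sdsum _ (by positivity)]
  rw [show ((pvValNat c 0 : Nat) : Int).toNat = pvValNat c 0 from by omega]
  rw [pvSdsum_val c 0 h, pvSdsum_zero]
  rw [Nat.zero_add]
  unfold pvGoodS
  constructor
  · rintro ⟨h1, h2⟩
    exact ⟨fun hh => h1 (by simp [hh]), h2⟩
  · rintro ⟨h1, h2⟩
    refine ⟨fun hh => h1 ?_, h2⟩
    exact_mod_cast hh

-- ---------- small summation helpers ----------

lemma pvSum_map_add {α : Type} (L : List α) (f g : α → Nat) :
    (L.map (fun a => f a + g a)).sum = (L.map f).sum + (L.map g).sum := by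
  induction L with
  | nil => rfl
  | cons a t ih =>
    simp only [List.map_cons, List.sum_cons, ih]
    try omega

lemma pvSum_comm {α β : Type} (C : List β) (L : List α) (f : β → α → Nat) :
    (C.map (fun c => (L.map (f c)).sum)).sum =
      (L.map (fun a => (C.map (fun c => f c a)).sum)).sum := by
  induction C with
  | nil => simp
  | cons c C ih =>
    simp only [List.map_cons, List.sum_cons, ih]
    rw [← pvSum_map_add]

lemma pvCountP_as_sum {α : Type} (L : List α) (p : α → Bool) :
    L.countP p = (L.map (fun a => if p a then 1 else 0)).sum := by
  induction L with
  | nil => rfl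
  | cons a L ih =>
    rw [List.countP_cons, List.map_cons, List.sum_cons, ih]
    by_cases hp : p a <;> simp [hp] <;> omega

lemma pvPartition {α β : Type} (C : List β) (L : List α) (p : β → α → Bool) (good : α → Bool)
    (h : ∀ a ∈ L, (C.countP (fun c => p c a)) = if good a then 1 else 0) :
    (C.map (fun c => L.countP (p c))).sum = L.countP good := by
  have h1 : (C.map (fun c => L.countP (p c))).sum =
      (C.map (fun c => (L.map (fun a => if p c a then 1 else 0)).sum)).sum := by
    congr 1
    exact List.map_congr_left (fun c _ => pvCountP_as_sum L (p c))
  rw [h1, pvSum_comm]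
  rw [pvCountP_as_sum L good]
  congr 1
  refine List.map_congr_left (fun a ha => ?_)
  rw [← pvCountP_as_sum, h a ha]

lemma pvCountP_unique {α : Type} (l : List α) (q : α → Bool) (c₀ : α)
    (hnd : l.Nodup) (hmem : c₀ ∈ l) (hq : q c₀ = true)
    (huniq : ∀ c ∈ l, q c = true → c = c₀) : l.countP q = 1 := by
  induction l with
  | nil => simp at hmem
  | cons a t ih =>
    rw [List.countP_cons]
    rcases List.mem_cons.mp hmem with rfl | hmem'
    · have ht : t.countP q = 0 := by
        rw [List.countP_eq_zero]
        intro b hb hqb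
        have := huniq b (by simp [hb]) hqb
        subst this
        exact (List.nodup_cons.mp hnd).1 hb
      simp [ht, hq]
    · have ha : ¬ q a = true := by
        intro hqa
        have := huniq a (by simp) hqa
        subst this
        exact (List.nodup_cons.mp hnd).1 hmem'
      rw [ih (List.nodup_cons.mp hnd).2 hmem' (fun c hc hqc => huniq c (by simp [hc]) hqc)]
      simp [ha]

lemma pvFoldIf {α : Type} (L : List α) (p : α → Prop) [DecidablePred p] (g : α → Int) :
    ∀ init : Int, L.foldl (fun acc x => if p x then acc + g x else acc) init =
      init + (L.map (fun x => if p x then g x else 0)).sum := by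
  induction L with
  | nil => intro init; simp
  | cons a t ih =>
    intro init
    rw [List.foldl_cons, ih, List.map_cons, List.sum_cons]
    by_cases hp : p a <;> simp [hp] <;> ring

-- ---------- the anagram count ----------

lemma pvAll_mem (n : Nat) (l : List Char) (hl : l ∈ pvAll n) :
    l.length = n ∧ ∀ c ∈ l, c ∈ pvADigits := by
  induction n generalizing l with
  | zero => simp only [pvAll, List.mem_singleton] at hl; subst hl; simp
  | succ n ih =>
    simp only [pvAll, List.mem_flatMap, List.mem_map] at hl
    obtain ⟨d, hd, l', hl', rfl⟩ := hl
    obtain ⟨hlen, hmem⟩ := ih l' hl'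
    refine ⟨by simp [hlen], ?_⟩
    intro c hc
    rcases List.mem_cons.mp hc with rfl | hc
    · exact hd
    · exact hmem c hc

lemma pvProd_update {α : Type} [DecidableEq α] (xs : List α) (d : α) (f g : α → Nat)
    (hnd : xs.Nodup) (hd : d ∈ xs) (hfg : ∀ e ∈ xs, e ≠ d → f e = g e) :
    (xs.map f).prod * g d = (xs.map g).prod * f d := by
  induction xs with
  | nil => simp at hd
  | cons x t ih =>
    rcases List.mem_cons.mp hd with rfl | hd'
    · have ht : ∀ e ∈ t, f e = g e := by
        intro e he
        refine hfg e (by simp [he]) ?_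
        intro heq; subst heq
        exact (List.nodup_cons.mp hnd).1 he
      have : t.map f = t.map g := List.map_congr_left ht
      simp only [List.map_cons, List.prod_cons, this]
      ring
    · have hx : f x = g x := by
        refine hfg x (by simp) ?_
        intro heq; subst heq
        exact (List.nodup_cons.mp hnd).1 hd'
      simp only [List.map_cons, List.prod_cons, hx]
      rw [mul_assoc, mul_assoc, ih (List.nodup_cons.mp hnd).2 hd'
        (fun e he hne => hfg e (by simp [he]) hne)]

lemma pvF_erase (c : List Char) (d : Char) (hd : d ∈ c) (hdig : d ∈ pvADigits) :
    pvF c = (List.count d c) * pvF (c.erase d) := by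
  have hkey := pvProd_update pvADigits d
    (fun e => (List.count e c).factorial) (fun e => (List.count e (c.erase d)).factorial)
    (by decide) hdig
    (fun e he hne => by
      show (List.count e c).factorial = (List.count e (c.erase d)).factorial
      rw [List.count_erase_of_ne hne])
  have hcount : List.count d (c.erase d) = List.count d c - 1 := by
    rw [List.count_erase_self]
  have hpos : 1 ≤ List.count d c := List.one_le_count_iff.mpr hd
  unfold pvF
  have hfact : (List.count d c).factorial =
      List.count d c * (List.count d (c.erase d)).factorial := by
    rw [hcount]
    rcases Nat.exists_eq_add_of_le hpos with ⟨k, hk⟩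
    rw [hk]
    simp [Nat.factorial_succ, Nat.add_comm 1 k]
  calc (pvADigits.map (fun e => (List.count e c).factorial)).prod
      = (pvADigits.map (fun e => (List.count e c).factorial)).prod *
          (List.count d (c.erase d)).factorial /
          (List.count d (c.erase d)).factorial := by
        rw [Nat.mul_div_cancel _ (Nat.factorial_pos _)]
    _ = (pvADigits.map (fun e => (List.count e (c.erase d)).factorial)).prod *
          (List.count d c).factorial / (List.count d (c.erase d)).factorial := by rw [hkey]
    _ = List.count d c *
          (pvADigits.map (fun e => (List.count e (c.erase d)).factorial)).prod := by
        rw [hfact]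
        rw [show (pvADigits.map (fun e => (List.count e (c.erase d)).factorial)).prod *
            (List.count d c * (List.count d (c.erase d)).factorial) =
            List.count d c *
            (pvADigits.map (fun e => (List.count e (c.erase d)).factorial)).prod *
            (List.count d (c.erase d)).factorial from by ring]
        rw [Nat.mul_div_cancel _ (Nat.factorial_pos _)]

lemma pvSum_counts (c : List Char) (h : ∀ x ∈ c, x ∈ pvADigits) :
    (pvADigits.map (fun d => List.count d c)).sum = c.length := by
  induction c with
  | nil => decide
  | cons x t ih =>
    have hx := h x (by simp)
    have h1 : (pvADigits.map (fun d => List.count d (x :: t))).sum =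
        (pvADigits.map (fun d => List.count d t + if x = d then 1 else 0)).sum := by
      congr 1
      refine List.map_congr_left (fun d _ => ?_)
      rw [List.count_cons]
      by_cases hxd : x = d <;> simp [hxd, beq_iff_eq]
    rw [h1, pvSum_map_add, ih (fun y hy => h y (by simp [hy]))]
    have h2 : (pvADigits.map (fun d => if x = d then 1 else 0)).sum = 1 := by
      fin_cases hx <;> decide
    rw [h2]
    simp

lemma pvKey (c : List Char) (h : ∀ x ∈ c, x ∈ pvADigits) :
    pvNP c * pvF c = (c.length).factorial := by
  unfold pvNP
  induction hlen : c.length generalizing c with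
  | zero =>
    rw [List.length_eq_zero_iff.mp hlen]
    decide
  | succ n ih =>
    have hcntP : (pvAll (n + 1)).countP (fun l => decide (l.Perm c)) =
        ((pvADigits.map (fun d =>
          if d ∈ c then (pvAll n).countP (fun l => decide (l.Perm (c.erase d))) else 0)).sum) := by
      show (pvADigits.flatMap (fun d => (pvAll n).map (d :: ·))).countP _ = _
      rw [List.countP_flatMap]
      simp only [Function.comp_def]
      congr 1
      refine List.map_congr_left (fun d _ => ?_)
      rw [List.countP_map]
      by_cases hdc : d ∈ c
      · rw [if_pos hdc]
        refine List.countP_congr (fun l _ => ?_)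
        simp only [Function.comp_apply, decide_eq_true_eq]
        constructor
        · intro hperm
          exact (List.cons_perm_iff_perm_erase.mp hperm).2
        · intro hperm
          exact List.cons_perm_iff_perm_erase.mpr ⟨hdc, hperm⟩
      · rw [if_neg hdc, List.countP_eq_zero]
        intro l _
        simp only [Function.comp_apply, decide_eq_true_eq]
        intro hperm
        exact hdc (hperm.mem_iff.mp (by simp))
    rw [hcntP]
    rw [← List.sum_map_mul_right]
    have hterm : ∀ d ∈ pvADigits,
        (if d ∈ c then (pvAll n).countP (fun l => decide (l.Perm (c.erase d))) else 0) * pvF c =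
          List.count d c * n.factorial := by
      intro d hd
      by_cases hdc : d ∈ c
      · rw [if_pos hdc]
        have herlen : (c.erase d).length = n := by
          rw [List.length_erase_of_mem hdc, hlen]
          omega
        have hermem : ∀ x ∈ c.erase d, x ∈ pvADigits :=
          fun x hx => h x (List.mem_of_mem_erase hx)
        have := ih (c.erase d) hermem herlen
        rw [pvF_erase c d hdc hd]
        calc (pvAll n).countP (fun l => decide (l.Perm (c.erase d))) *
              (List.count d c * pvF (c.erase d))
            = List.count d c * ((pvAll n).countP (fun l => decide (l.Perm (c.erase d))) *
              pvF (c.erase d)) := by ring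
          _ = List.count d c * n.factorial := by rw [this]
      · rw [if_neg hdc, List.count_eq_zero.mpr hdc]
        simp
    rw [List.map_congr_left hterm]
    have : (pvADigits.map (fun d => List.count d c * n.factorial)).sum =
        (pvADigits.map (fun d => List.count d c)).sum * n.factorial := by
      rw [← List.sum_map_mul_right]
    rw [this, pvSum_counts c h, hlen, Nat.factorial_succ]

-- ---------- combinations_with_replacement enumerates the sorted digit strings ----------

lemma pvCWR_mem {α : Type} (r : Nat) (xs : List α) (c : List α) (hc : c ∈ pvCWR r xs) :
    c.length = r ∧ ∀ x ∈ c, x ∈ xs := by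
  induction r generalizing xs c with
  | zero =>
    simp only [pvCWR, List.mem_singleton] at hc
    subst hc; simp
  | succ r ih =>
    simp only [pvCWR, List.mem_flatMap] at hc
    obtain ⟨s, hs, hcs⟩ := hc
    match s with
    | [] => simp at hcs
    | y :: rest =>
      simp only [List.mem_map] at hcs
      obtain ⟨c', hc', rfl⟩ := hcs
      have hsuf : (y :: rest) <:+ xs := (List.mem_tails _ _).mp hs
      obtain ⟨hlen, hmem⟩ := ih (y :: rest) c' hc'
      refine ⟨by simp [hlen], ?_⟩
      intro x hx
      rcases List.mem_cons.mp hx with rfl | hx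
      · exact hsuf.subset (by simp)
      · exact hsuf.subset (hmem x hx)

lemma pvCWR_cons {α : Type} (r : Nat) (y : α) (rest : List α) :
    pvCWR (r + 1) (y :: rest) =
      (pvCWR r (y :: rest)).map (y :: ·) ++ pvCWR (r + 1) rest := by
  conv_lhs => rw [pvCWR]
  rw [List.tails_cons, List.flatMap_cons]
  rfl

lemma pvCWR_succ_nil {α : Type} (r : Nat) : pvCWR (r + 1) ([] : List α) = [] := by
  rw [pvCWR]
  rfl

lemma pvCWR_sorted {α : Type} [LinearOrder α] (r : Nat) :
    ∀ (xs : List α), xs.Pairwise (· ≤ ·) → ∀ c ∈ pvCWR r xs, c.Pairwise (· ≤ ·) := by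
  induction r with
  | zero =>
    intro xs _ c hc
    simp only [pvCWR, List.mem_singleton] at hc
    subst hc
    exact List.Pairwise.nil
  | succ r ih =>
    intro xs hxs c hc
    induction xs with
    | nil => rw [pvCWR_succ_nil] at hc; simp at hc
    | cons y rest ihxs =>
      rw [pvCWR_cons, List.mem_append] at hc
      rcases hc with hc | hc
      · obtain ⟨c', hc', rfl⟩ := List.mem_map.mp hc
        have hs' := ih (y :: rest) hxs c' hc'
        refine List.pairwise_cons.mpr ⟨?_, hs'⟩
        intro x hx
        have hmem := (pvCWR_mem r (y :: rest) c' hc').2 x hx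
        rcases List.mem_cons.mp hmem with rfl | hmem'
        · exact le_refl x
        · exact (List.pairwise_cons.mp hxs).1 x hmem'
      · exact ihxs (List.Pairwise.sublist (List.sublist_cons_self y rest) hxs) hc

lemma pvCWR_complete_aux {α : Type} [LinearOrder α] (r : Nat)
    (ih : ∀ (xs : List α), xs.Pairwise (· < ·) → ∀ c : List α, c.length = r →
      (∀ x ∈ c, x ∈ xs) → c.Pairwise (· ≤ ·) → c ∈ pvCWR r xs)
    (y : α) (c' : List α) (hlen : c'.length = r) (hsort : (y :: c').Pairwise (· ≤ ·)) :
    ∀ xs : List α, xs.Pairwise (· < ·) → (∀ x ∈ y :: c', x ∈ xs) →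
      (y :: c') ∈ pvCWR (r + 1) xs := by
  intro xs
  induction xs with
  | nil =>
    intro _ hmem
    exact absurd (hmem y (by simp)) (by simp)
  | cons z rest ihxs =>
    intro hxs hmem
    rw [pvCWR_cons, List.mem_append]
    rcases eq_or_ne y z with rfl | hyz
    · left
      refine List.mem_map.mpr ⟨c', ?_, rfl⟩
      exact ih (y :: rest) hxs c' hlen (fun x hx => hmem x (by simp [hx]))
        (List.pairwise_cons.mp hsort).2
    · right
      have hymem : y ∈ rest := by
        rcases List.mem_cons.mp (hmem y (by simp)) with heq | h'
        · exact absurd heq hyz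
        · exact h'
      refine ihxs (List.Pairwise.sublist (List.sublist_cons_self z rest) hxs) ?_
      intro x hx
      rcases List.mem_cons.mp (hmem x hx) with rfl | h'
      · exfalso
        have hzy : x < y := (List.pairwise_cons.mp hxs).1 y hymem
        rcases List.mem_cons.mp hx with rfl | hx'
        · exact hyz rfl
        · have hyx : y ≤ x := (List.pairwise_cons.mp hsort).1 x hx'
          exact absurd (lt_of_lt_of_le hzy hyx) (lt_irrefl x)
      · exact h'

lemma pvCWR_complete {α : Type} [LinearOrder α] (r : Nat) :
    ∀ (xs : List α), xs.Pairwise (· < ·) → ∀ c : List α, c.length = r →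
      (∀ x ∈ c, x ∈ xs) → c.Pairwise (· ≤ ·) → c ∈ pvCWR r xs := by
  induction r with
  | zero =>
    intro xs _ c hlen _ _
    rw [List.length_eq_zero_iff.mp hlen]
    simp [pvCWR]
  | succ r ih =>
    intro xs hxs c hlen hmem hsort
    rcases c with _ | ⟨y, c'⟩
    · simp at hlen
    · exact pvCWR_complete_aux r ih y c' (by simpa using hlen) hsort xs hxs hmem

lemma pvCWR_nodup {α : Type} [DecidableEq α] (r : Nat) :
    ∀ (xs : List α), xs.Nodup → (pvCWR r xs).Nodup := by
  induction r with
  | zero => intro xs _; simp [pvCWR]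
  | succ r ih =>
    intro xs hxs
    induction xs with
    | nil => rw [pvCWR_succ_nil]; exact List.nodup_nil
    | cons y rest ihxs =>
      rw [pvCWR_cons]
      refine List.Nodup.append ?_ (ihxs (List.nodup_cons.mp hxs).2) ?_
      · exact (ih (y :: rest) hxs).map (fun a b hab => by simpa using hab)
      · intro c hc1 hc2
        obtain ⟨c', _, rfl⟩ := List.mem_map.mp hc1
        obtain ⟨hlen, hmem⟩ := pvCWR_mem (r + 1) rest _ hc2
        have : y ∈ rest := hmem y (by simp)
        exact (List.nodup_cons.mp hxs).1 this

-- ---------- the DP recurrence ----------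

lemma pvSsum_le (l : List Char) (h : ∀ c ∈ l, c ∈ pvADigits) : pvSsum l ≤ 81 * l.length := by
  induction l with
  | nil => simp [pvSsum]
  | cons c rest ih =>
    have hd : pvDval c < 10 := pvDval_lt c (h c (by simp))
    have := ih (fun x hx => h x (by simp [hx]))
    unfold pvSsum at *
    simp only [List.map_cons, List.sum_cons, List.length_cons]
    have : pvDval c * pvDval c ≤ 81 := by nlinarith
    simp only [Nat.mul_succ]
    omega

lemma pvW_succ (n s : Nat) :
    pvW (n + 1) s =
      ((List.range 10).map (fun d => if d * d ≤ s then pvW n (s - d * d) else 0)).sum := by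
  unfold pvW
  show (pvADigits.flatMap (fun d => (pvAll n).map (d :: ·))).countP _ = _
  rw [List.countP_flatMap]
  simp only [Function.comp_def]
  have h1 : ∀ d ∈ pvADigits,
      ((pvAll n).map (d :: ·)).countP (fun l => decide (pvSsum l = s)) =
        (fun d => if d * d ≤ s then pvW n (s - d * d) else 0) (pvDval d) := by
    intro d _
    rw [List.countP_map]
    simp only []
    by_cases hds : pvDval d * pvDval d ≤ s
    · rw [if_pos hds]
      unfold pvW
      refine List.countP_congr (fun l _ => ?_)
      simp only [Function.comp_apply, decide_eq_true_eq]
      have : pvSsum (d :: l) = pvDval d * pvDval d + pvSsum l := by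
        simp [pvSsum]
      rw [this]
      omega
    · rw [if_neg hds, List.countP_eq_zero]
      intro l _
      simp only [Function.comp_apply, decide_eq_true_eq]
      have : pvSsum (d :: l) = pvDval d * pvDval d + pvSsum l := by
        simp [pvSsum]
      omega
  rw [List.map_congr_left h1]
  have h2 : pvADigits.map (fun a => (fun d => if d * d ≤ s then pvW n (s - d * d) else 0)
      (pvDval a)) = (pvADigits.map pvDval).map
        (fun d => if d * d ≤ s then pvW n (s - d * d) else 0) := by
    rw [List.map_map]
    rfl
  rw [h2, show pvADigits.map pvDval = List.range 10 from by decide]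
  rfl

lemma pvW_zero_of_big (n s : Nat) (hs : 81 * n < s) : pvW n s = 0 := by
  unfold pvW
  rw [List.countP_eq_zero]
  intro l hl
  obtain ⟨hlen, hmem⟩ := pvAll_mem n l hl
  have := pvSsum_le l hmem
  rw [hlen] at this
  simp only [decide_eq_true_eq]
  omega

-- ---------- the B-side loop ----------

lemma pvCastSumG {α : Type} (l : List α) (f : α → Nat) :
    ((l.map (fun a => ((f a : Nat) : Int))).sum) = (((l.map f).sum : Nat) : Int) := by
  induction l with
  | nil => rfl
  | cons c rest ih => simp [ih]

lemma pvGetD_map_range {β : Type} (n j : Nat) (f : Nat → β) (d : β) (hj : j < n) :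
    (((List.range n).map f).getD j d) = f j := by
  rw [List.getD_eq_getElem?_getD, List.getElem?_map, List.getElem?_range hj]
  rfl

lemma pvRow_eq (k : Nat) :
    pvBRow ((List.range (81 * k + 1)).map (fun s => ((pvW k s : Nat) : Int))) =
      (List.range (81 * (k + 1) + 1)).map (fun s => ((pvW (k + 1) s : Nat) : Int)) := by
  unfold pvBRow
  rw [PySem.List.len_eq, List.length_map, List.length_range]
  rw [show ((81 * k + 1 : Nat) : Int) + 81 = ((81 * (k + 1) + 1 : Nat) : Int) from by
    push_cast; ring]
  rw [PySem.List.pyRange_one, PySem.List.pyRange_one,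
    show (((81 * (k + 1) + 1 : Nat) : Int) - 0).toNat = 81 * (k + 1) + 1 from by omega,
    show ((10 : Int) - 0).toNat = 10 from by decide, List.map_map]
  refine List.map_congr_left (fun sn hsn => ?_)
  have hsn' : sn < 81 * (k + 1) + 1 := List.mem_range.mp hsn
  simp only [Function.comp_def, zero_add]
  rw [List.foldl_map, pvFoldIf, zero_add, pvW_succ k sn, ← pvCastSumG]
  refine congrArg List.sum (List.map_congr_left (fun d hd => ?_))
  have hd10 : d < 10 := List.mem_range.mp hd
  by_cases h1 : d * d ≤ sn
  · by_cases h2 : sn - d * d < 81 * k + 1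
    · rw [if_pos (by constructor <;> push_cast <;> omega)]
      rw [show ((sn : Int) - (d : Int) * (d : Int)) = ((sn - d * d : Nat) : Int) from by
        push_cast; omega, PySem.List.pyGetD_natCast,
        pvGetD_map_range _ _ _ _ h2, if_pos h1]
    · rw [if_neg (by push_cast; omega), if_pos h1,
        pvW_zero_of_big k (sn - d * d) (by omega)]
      simp
  · rw [if_neg (by push_cast; omega), if_neg h1]
    simp

lemma pvIter (L : List Int) (w : List Int) :
    L.foldl (fun w _ => pvBRow w) w = (fun w => pvBRow w)^[L.length] w := by
  induction L generalizing w with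
  | nil => rfl
  | cons a t ih => rw [List.foldl_cons, ih, List.length_cons,
      Function.iterate_succ_apply]

lemma pvWays (t : Nat) :
    (fun w => pvBRow w)^[t] [(1 : Int)] =
      (List.range (81 * t + 1)).map (fun s => ((pvW t s : Nat) : Int)) := by
  induction t with
  | zero => decide
  | succ k ih =>
    rw [Function.iterate_succ_apply', ih, pvRow_eq]

lemma pvBFinal (t : Nat) :
    pvBMain ((t : Int) + 1) = ((((List.range (81 * t + 1)).map
      (fun s => if pvGoodS s then pvW t s else 0)).sum : Nat) : Int) := by
  show (PySem.List.enumerate ((PySem.List.pyRange 0 ((t : Int) + 1 - 1) 1).foldl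
      (fun ways _ => pvBRow ways) [(1 : Int)]) 0).foldl _ 0 = _
  rw [show ((t : Int) + 1 - 1) = (t : Int) from by ring, PySem.List.pyRange_one,
    show (((t : Int)) - 0).toNat = t from by omega, pvIter, List.length_map,
    List.length_range, pvWays t]
  rw [PySem.List.enumerate_eq_map_pyRange _ 0, PySem.List.len_eq, List.length_map,
    List.length_range, PySem.List.pyRange_one,
    show (((81 * t + 1 : Nat) : Int) - 0).toNat = 81 * t + 1 from by omega,
    List.map_map]
  simp only [Function.comp_def, zero_add]
  rw [List.foldl_map]
  have hbody : ∀ (total : Int), ∀ j ∈ List.range (81 * t + 1),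
      (fun total sc => if sc.1 ≠ 0 then
          if pvEndLoop 999 sc.1 = 89 then total + sc.2 else total
        else total) total
        ((fun j : Nat => (((j : Nat) : Int),
          PySem.List.pyGetD ((List.range (81 * t + 1)).map
            (fun s => ((pvW t s : Nat) : Int))) ((j : Nat) : Int) 0)) j) =
      (fun total j => if pvGoodS j then total + ((pvW t j : Nat) : Int) else total) total j := by
    intro total j hj
    have hj' : j < 81 * t + 1 := List.mem_range.mp hj
    simp only []
    rw [PySem.List.pyGetD_natCast, pvGetD_map_range _ _ _ _ hj']
    by_cases hz : j = 0
    · subst hz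
      rw [if_neg (by simp), if_neg (by intro hg; exact hg.1 rfl)]
    · rw [if_pos (by exact_mod_cast hz)]
      by_cases he : pvEndLoop 999 ((j : Nat) : Int) = 89
      · rw [if_pos he, if_pos ⟨hz, he⟩]
      · rw [if_neg he, if_neg (fun hg => he hg.2)]
  rw [PySem.List.foldl_congr_mem _ _ _ _ hbody, pvFoldIf, zero_add, ← pvCastSumG]
  refine congrArg List.sum (List.map_congr_left (fun j hj => ?_))
  by_cases hg : pvGoodS j
  · rw [if_pos hg, if_pos hg]
  · rw [if_neg hg, if_neg hg]
    simp

-- ---------- assembling both sides ----------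

lemma pvCount_range (N x : Nat) :
    (List.range N).countP (fun s => decide (x = s)) = if x < N then 1 else 0 := by
  induction N with
  | zero => simp
  | succ n ih =>
    rw [List.range_succ, List.countP_append, ih]
    by_cases h1 : x = n
    · subst h1
      simp [List.countP_cons]
    · by_cases h2 : x < n
      · have h3 : x < n + 1 := by omega
        simp [List.countP_cons, h1, h2, h3]
      · have h3 : ¬ x < n + 1 := by omega
        simp [List.countP_cons, h1, h2, h3]

lemma pvCountAll (t : Nat) :
    ((List.range (81 * t + 1)).map (fun s => if pvGoodS s then pvW t s else 0)).sum =
      (pvAll t).countP (fun l => decide (pvGoodS (pvSsum l))) := by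
  have hpart := pvPartition (List.range (81 * t + 1)) (pvAll t)
    (fun s a => decide (pvSsum a = s ∧ pvGoodS (pvSsum a)))
    (fun a => decide (pvGoodS (pvSsum a))) ?_
  · rw [← hpart]
    refine congrArg List.sum (List.map_congr_left (fun s _ => ?_))
    by_cases hg : pvGoodS s
    · rw [if_pos hg]
      unfold pvW
      refine List.countP_congr (fun a _ => ?_)
      simp only [decide_eq_true_eq]
      constructor
      · intro ha
        exact ⟨ha, ha ▸ hg⟩
      · intro ha
        exact ha.1
    · rw [if_neg hg]
      symm
      rw [List.countP_eq_zero]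
      intro a _
      intro hcontra
      obtain ⟨h1, h2⟩ := of_decide_eq_true hcontra
      exact hg (h1 ▸ h2)
  · intro a ha
    obtain ⟨halen, hamem⟩ := pvAll_mem t a ha
    by_cases hg : pvGoodS (pvSsum a)
    · rw [if_pos (by simpa using hg)]
      have hcongr : (List.range (81 * t + 1)).countP
          (fun s => decide (pvSsum a = s ∧ pvGoodS (pvSsum a))) =
          (List.range (81 * t + 1)).countP (fun s => decide (pvSsum a = s)) :=
        List.countP_congr (fun s _ => by
          simp only [decide_eq_true_eq]
          exact ⟨fun h => h.1, fun h => ⟨h, hg⟩⟩)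
      rw [hcongr, pvCount_range, if_pos]
      have := pvSsum_le a hamem
      omega
    · rw [if_neg (by simpa using hg), List.countP_eq_zero]
      intro s _
      intro hcontra
      exact hg (of_decide_eq_true hcontra).2

lemma pvSsum_perm {a c : List Char} (h : a.Perm c) : pvSsum a = pvSsum c :=
  (h.map _).sum_eq

lemma pvCWRsum (t : Nat) :
    ((pvCWR t pvADigits).map
        (fun c => if pvGoodS (pvSsum c) then pvNP c else 0)).sum =
      (pvAll t).countP (fun l => decide (pvGoodS (pvSsum l))) := by
  have hpart := pvPartition (pvCWR t pvADigits) (pvAll t)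
    (fun c a => decide (a.Perm c ∧ pvGoodS (pvSsum a)))
    (fun a => decide (pvGoodS (pvSsum a))) ?_
  · rw [← hpart]
    refine congrArg List.sum (List.map_congr_left (fun c hc => ?_))
    obtain ⟨hclen, hcmem⟩ := pvCWR_mem t pvADigits c hc
    by_cases hg : pvGoodS (pvSsum c)
    · rw [if_pos hg]
      unfold pvNP
      rw [hclen]
      refine List.countP_congr (fun a _ => ?_)
      simp only [decide_eq_true_eq]
      constructor
      · intro ha
        exact ⟨ha, (pvSsum_perm ha) ▸ hg⟩
      · intro ha
        exact ha.1
    · rw [if_neg hg]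
      symm
      rw [List.countP_eq_zero]
      intro a _
      intro hcontra
      obtain ⟨h1, h2⟩ := of_decide_eq_true hcontra
      exact hg ((pvSsum_perm h1) ▸ h2)
  · intro a ha
    obtain ⟨halen, hamem⟩ := pvAll_mem t a ha
    by_cases hg : pvGoodS (pvSsum a)
    · rw [if_pos (by simpa using hg)]
      have hcongr : (pvCWR t pvADigits).countP
          (fun c => decide (a.Perm c ∧ pvGoodS (pvSsum a))) =
          (pvCWR t pvADigits).countP (fun c => decide (a.Perm c)) :=
        List.countP_congr (fun c _ => by
          simp only [decide_eq_true_eq]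
          exact ⟨fun h => h.1, fun h => ⟨h, hg⟩⟩)
      rw [hcongr]
      have hperm := List.perm_insertionSort (· ≤ ·) a
      refine pvCountP_unique _ _ (List.insertionSort (· ≤ ·) a)
        (pvCWR_nodup t pvADigits (by decide)) ?_ (by simpa using hperm.symm) ?_
      · refine pvCWR_complete t pvADigits (by decide) _ ?_ ?_
          (List.pairwise_insertionSort (· ≤ ·) a)
        · rw [hperm.length_eq, halen]
        · intro x hx
          exact hamem x (hperm.mem_iff.mp hx)
      · intro c hc hq
        have hac : a.Perm c := of_decide_eq_true hq
        have hsc := pvCWR_sorted t pvADigits (by decide) c hc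
        refine List.eq_of_perm_of_sorted (fun x y _ _ hxy hyx => le_antisymm hxy hyx)
          hsc (List.pairwise_insertionSort (· ≤ ·) a)
          (hac.symm.trans hperm.symm)
    · rw [if_neg (by simpa using hg), List.countP_eq_zero]
      intro c _
      intro hcontra
      exact hg (of_decide_eq_true hcontra).2

lemma pvF_pos (c : List Char) : 0 < pvF c := by
  refine List.prod_pos ?_
  intro x hx
  obtain ⟨d, _, rfl⟩ := List.mem_map.mp hx
  exact Nat.factorial_pos _

lemma pvAFinal (t : Nat) (ht : 1 ≤ t) :
    pvAMain ((t : Int) + 1) = ((((pvCWR t pvADigits).map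
      (fun c => if pvGoodS (pvSsum c) then pvNP c else 0)).sum : Nat) : Int) := by
  show (pvCWR (((t : Int) + 1 - 1)).toNat pvADigits).foldl _ 0 = _
  rw [show ((t : Int) + 1 - 1) = (t : Int) from by ring,
    show ((t : Int)).toNat = t from by omega]
  have hbody : (fun (counter : Int) (number_digits : List Char) =>
      have chain := pvAChain number_digits
      if PySem.List.pyGetD chain (-1) 0 = 89 then
        counter +
          PySem.Int.floordiv (pvAGetFact ((t : Int) + 1) (t : Int))
            (((PySem.Dict.counter number_digits).values.map
              (pvAGetFact ((t : Int) + 1))).foldl (· * ·) 1)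
      else counter) =
      (fun (counter : Int) (c : List Char) =>
        if PySem.List.pyGetD (pvAChain c) (-1) 0 = 89 then
          counter +
            PySem.Int.floordiv (pvAGetFact ((t : Int) + 1) (t : Int))
              (((PySem.Dict.counter c).values.map
                (pvAGetFact ((t : Int) + 1))).foldl (· * ·) 1)
        else counter) := rfl
  rw [hbody, pvFoldIf, zero_add, ← pvCastSumG]
  refine congrArg List.sum (List.map_congr_left (fun c hc => ?_))
  obtain ⟨hclen, hcmem⟩ := pvCWR_mem t pvADigits c hc
  have hcne : c ≠ [] := by
    intro h
    rw [h] at hclen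
    simp at hclen
    omega
  rw [pvGetFact_eq ((t : Int) + 1) (t : Int) (by omega) (by omega),
    show ((t : Int)).toNat = t from by omega,
    pvDenom_eq ((t : Int) + 1) c hcmem (by rw [hclen]; omega)]
  have hkey : t.factorial = pvNP c * pvF c := by
    rw [pvKey c hcmem, hclen]
  by_cases hg : pvGoodS (pvSsum c)
  · rw [if_pos ((pvGood_eq c hcne hcmem).mpr hg), if_pos hg, hkey,
      PySem.Int.floordiv_natCast, Nat.mul_div_cancel _ (pvF_pos c)]
  · rw [if_neg (fun hh => hg ((pvGood_eq c hcne hcmem).mp hh)), if_neg hg]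
    simp

lemma pvMain_eq (L : Int) (hL : 2 ≤ L) : pvAMain L = pvBMain L := by
  obtain ⟨t, rfl⟩ : ∃ t : Nat, L = (t : Int) + 1 := ⟨(L - 1).toNat, by omega⟩
  have ht : 1 ≤ t := by omega
  rw [pvAFinal t ht, pvBFinal t, pvCWRsum t, pvCountAll t]

lemma pvTD_long (fuel : Nat) : ∀ (n : Nat) (acc : List Char), n < fuel →
    acc.length + 1 ≤ (Nat.toDigitsCore 10 fuel n acc).length := by
  induction fuel with
  | zero => omega
  | succ f ih =>
    intro n acc hn
    rw [Nat.toDigitsCore]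
    by_cases h0 : n / 10 = 0
    · rw [if_pos h0]; simp
    · rw [if_neg h0]
      have := ih (n / 10) ((n % 10).digitChar :: acc) (by omega)
      simp at this
      omega

lemma pvLen_ge_two (threshold : Int)
    (hpre : Pre_get_square_digit_chains_89_results threshold) :
    2 ≤ PySem.Str.len (PySem.Int.toStr threshold) := by
  rw [PySem.Str.len_eq, PySem.Int.toList_toStr]
  unfold PySem.Int.toChars
  unfold Pre_get_square_digit_chains_89_results at hpre
  split
  · have : 1 ≤ (Nat.toDigits 10 threshold.natAbs).length := by
      have := @Nat.length_toDigits_pos 10 threshold.natAbs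
      omega
    simp
    omega
  · next hneg =>
    have h10 : 10 ≤ threshold := by omega
    unfold Nat.toDigits
    rw [Nat.toDigitsCore]
    rw [if_neg (by omega)]
    have := pvTD_long (threshold.toNat) (threshold.toNat / 10)
      [(threshold.toNat % 10).digitChar] (by omega)
    simp at this ⊢
    omega

-- ===== VERDICT (by name: the statement is the Claim_ definition above) =====
theorem get_square_digit_chains_89_results_spec :
    Claim_equal_get_square_digit_chains_89_results := by
  intro threshold _ hpre
  unfold Spec_get_square_digit_chains_89_results get_square_digit_chains_89_results
    get_square_digit_chains_89_results_alt
  exact pvMain_eq _ (pvLen_ge_two threshold hpre)
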